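-- pv_equiv track=rewrite | github.com/Julien-MKT-samedia/samedia-entretiens-2026 | rescore_nicolas_strict.py | score_prospection_nicolas
-- ===== SOURCE A (Python) =====
-- def score_prospection_nicolas(text):
--     """Nicolas: 0=not hunting, 1=some hunting/acquisition, 2=strong hunter (rare)"""
--     text_lower = text.lower()
--
--     # STRONG prospection = 2
--     strong_prospection = ['prospecteur', 'prospecting', 'new business', 'lead generation', 'business acquisition']
--     if any(kw in text_lower for kw in strong_prospection):
--         return 2
--
--     # Some prospection = 1
--     soft_prospection = ['prospection', 'hunting', 'acquisition', 'bdm', 'account executive']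
--     if any(kw in text_lower for kw in soft_prospection):
--         return 1
--
--     return 0
-- ===== SOURCE B (Python) =====
-- _KEYWORD_SCORES = {
--     'prospecteur': 2, 'prospecting': 2, 'new business': 2,
--     'lead generation': 2, 'business acquisition': 2,
--     'prospection': 1, 'hunting': 1, 'acquisition': 1,
--     'bdm': 1, 'account executive': 1,
-- }
--
-- def score_prospection_nicolas(text):
--     """Nicolas: 0=not hunting, 1=some hunting/acquisition, 2=strong hunter (rare)"""
--     text_lower = text.lower()
--     return max((score for kw, score in _KEYWORD_SCORES.items() if kw in text_lower),
--                default=0)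
-- ===== Notes on version B (the rewrite author's own statement) =====
-- stated objective: simpler
-- what changed: Replaces the two priority-ordered keyword lists with early returns by a single keyword-to-score table and one max-over-matches pass with default 0 (valid because strong score 2 outranks soft score 1).
import Mathlib
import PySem

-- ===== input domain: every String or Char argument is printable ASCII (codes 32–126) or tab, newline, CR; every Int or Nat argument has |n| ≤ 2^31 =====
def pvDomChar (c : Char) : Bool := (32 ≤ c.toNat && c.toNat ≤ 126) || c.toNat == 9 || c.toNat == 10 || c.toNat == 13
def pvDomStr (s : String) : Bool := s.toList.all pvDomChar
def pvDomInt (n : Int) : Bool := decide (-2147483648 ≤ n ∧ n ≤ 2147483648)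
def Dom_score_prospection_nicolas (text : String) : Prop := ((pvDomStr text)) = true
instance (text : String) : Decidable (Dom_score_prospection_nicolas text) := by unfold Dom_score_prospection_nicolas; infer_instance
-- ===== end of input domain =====

-- B replaces the priority-ordered early-return keyword scan by one keyword→score table and a max-over-matches pass (objective: simpler).


-- ===== PORT A =====
def score_prospection_nicolas (text : String) : Int :=
  let text_lower := PySem.Str.lower text
  let strong_prospection := ["prospecteur", "prospecting", "new business", "lead generation", "business acquisition"]
  if strong_prospection.any (fun kw => PySem.Str.isIn kw text_lower) then 2
  else
    let soft_prospection := ["prospection", "hunting", "acquisition", "bdm", "account executive"]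
    if soft_prospection.any (fun kw => PySem.Str.isIn kw text_lower) then 1
    else 0

-- ===== PORT B =====
def keywordScores : List (String × Int) :=
  [("prospecteur", 2), ("prospecting", 2), ("new business", 2),
   ("lead generation", 2), ("business acquisition", 2),
   ("prospection", 1), ("hunting", 1), ("acquisition", 1),
   ("bdm", 1), ("account executive", 1)]

def score_prospection_nicolas_alt (text : String) : Int :=
  let text_lower := PySem.Str.lower text
  (((keywordScores.filter (fun p => PySem.Str.isIn p.1 text_lower)).map Prod.snd).max?).getD 0

-- ===== PRECONDITION & SPEC =====
def Spec_score_prospection_nicolas (text : String) (out : Int) : Prop := out = score_prospection_nicolas_alt text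
instance (text : String) (out : Int) : Decidable (Spec_score_prospection_nicolas text out) := by unfold Spec_score_prospection_nicolas; infer_instance

-- ===== CLAIM (what is proved, stated in full; the proofs are below) =====
def Claim_equal_score_prospection_nicolas : Prop := ∀ (text : String), Dom_score_prospection_nicolas text → Spec_score_prospection_nicolas text (score_prospection_nicolas text)

-- ===== LEMMAS AND PROOFS =====

-- ===== VERDICT (by name: the statement is the Claim_ definition above) =====
-- max?.getD 0 of a list equals a when a is a member and an upper bound
theorem pvMaxGetD {l : List Int} {a : Int} (ha : a ∈ l) (hle : ∀ x ∈ l, x ≤ a) :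
    l.max?.getD 0 = a := by
  have : l.max? = some a := List.max?_eq_some_iff.mpr ⟨ha, hle⟩
  simp [this]

theorem score_prospection_nicolas_spec : Claim_equal_score_prospection_nicolas := by
  intro text _
  unfold Spec_score_prospection_nicolas score_prospection_nicolas score_prospection_nicolas_alt
  set tl := PySem.Str.lower text with htl
  simp only []
  cases hS : (["prospecteur", "prospecting", "new business", "lead generation",
      "business acquisition"] : List String).any (fun kw => PySem.Str.isIn kw tl) with
  | true =>
    simp only [if_true]
    obtain ⟨kw, hkw, hin⟩ := List.any_eq_true.mp hS
    refine (pvMaxGetD ?_ ?_).symm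
    · fin_cases hkw <;>
        · refine List.mem_map.mpr ⟨(_, 2), List.mem_filter.mpr ⟨?_, hin⟩, rfl⟩
          unfold keywordScores
          simp
    · intro x hx
      obtain ⟨q, hq, rfl⟩ := List.mem_map.mp hx
      have hqm := (List.mem_filter.mp hq).1
      fin_cases hqm <;> norm_num
  | false =>
    simp only [Bool.false_eq_true, if_false]
    have hSf := List.any_eq_false.mp hS
    cases hF : (["prospection", "hunting", "acquisition", "bdm", "account executive"] :
        List String).any (fun kw => PySem.Str.isIn kw tl) with
    | true =>
      simp only [if_true]
      obtain ⟨kw, hkw, hin⟩ := List.any_eq_true.mp hF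
      refine (pvMaxGetD ?_ ?_).symm
      · fin_cases hkw <;>
          · refine List.mem_map.mpr ⟨(_, 1), List.mem_filter.mpr ⟨?_, hin⟩, rfl⟩
            unfold keywordScores
            simp
      · intro x hx
        obtain ⟨q, hq, rfl⟩ := List.mem_map.mp hx
        have hqm := (List.mem_filter.mp hq).1
        have hqp := (List.mem_filter.mp hq).2
        fin_cases hqm
        · exact absurd hqp (hSf _ (by simp))
        · exact absurd hqp (hSf _ (by simp))
        · exact absurd hqp (hSf _ (by simp))
        · exact absurd hqp (hSf _ (by simp))
        · exact absurd hqp (hSf _ (by simp))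
        · norm_num
        · norm_num
        · norm_num
        · norm_num
        · norm_num
    | false =>
      simp only [Bool.false_eq_true, if_false]
      have hFf := List.any_eq_false.mp hF
      have hnil : keywordScores.filter (fun p => PySem.Str.isIn p.1 tl) = [] := by
        refine List.filter_eq_nil_iff.mpr ?_
        intro q hq
        fin_cases hq <;> simp_all
      rw [hnil]
      rfl
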